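-- pv_equiv track=rewrite | github.com/alexandrepoulin/ProjectEulerInPython | problems/problem 93.py | nextCounter
-- ===== SOURCE A (Python) =====
-- def nextCounter(x):
--     nums = []
--     for i in x:
--         nums.append(i)
--     for i in range(0,4):
--         if nums[-i-1] != 3:
--             nums[-i-1] += 1
--             for k in range(0,i):
--                 nums[-i+k] = 0
--             break
--     return nums
-- ===== SOURCE B (Python) =====
-- def _go(rev, budget):
--     # rev = remaining digits, least-significant first; budget = positions left (max 4)
--     # returns the incremented reversed suffix, or None if every inspected digit was 3
--     if budget == 0 or not rev:
--         return None
--     d = rev[0]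
--     if d != 3:
--         return [d + 1] + rev[1:]
--     r = _go(rev[1:], budget - 1)
--     return None if r is None else [0] + r
--
-- def nextCounter(x):
--     r = _go(x[::-1], 4)
--     return list(x) if r is None else r[::-1]
-- ===== Notes on version B (the rewrite author's own statement) =====
-- stated objective: alternative
-- what changed: A copies the list and mutates it via an indexed loop over negative positions with a nested zeroing loop and break; B reverses the list and recursively rebuilds the incremented suffix least-significant-first, signalling the saturated all-3 window with None instead of in-place edits.
import Mathlib
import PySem

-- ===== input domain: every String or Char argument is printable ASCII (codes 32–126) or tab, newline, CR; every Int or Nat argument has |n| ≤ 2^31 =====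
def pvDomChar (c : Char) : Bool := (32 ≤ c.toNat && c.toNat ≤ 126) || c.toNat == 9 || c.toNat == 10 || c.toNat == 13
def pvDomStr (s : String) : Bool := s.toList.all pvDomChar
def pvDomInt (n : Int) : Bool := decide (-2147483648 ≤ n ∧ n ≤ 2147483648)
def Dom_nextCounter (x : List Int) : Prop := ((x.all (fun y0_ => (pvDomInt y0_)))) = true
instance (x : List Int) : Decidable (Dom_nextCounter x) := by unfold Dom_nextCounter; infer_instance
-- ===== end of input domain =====

-- B replaces A's negative-index mutation loop by a recursion over the reversed list that
-- rebuilds the incremented suffix and signals the saturated all-3 window with none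
-- (alternative decomposition; return value only — neither program mutates its argument).

-- ===== PORT A =====
-- the 'for i in range(0,4): if nums[-i-1] != 3: …; break' loop of A (break/fall-through = return nums)
def nextCounterLoop (nums : List Int) (i : Nat) : List Int :=
  if _h : i < 4 then
    match PySem.List.pyGet? nums (-(i : Int) - 1) with
    | none => []  -- IndexError in Python; excluded by Pre_nextCounter
    | some v =>
      if v ≠ 3 then
        let n1 := PySem.List.pySetD nums (-(i : Int) - 1) (v + 1)
        (PySem.List.pyRange 0 (i : Int) 1).foldl
          (fun a k => PySem.List.pySetD a (-(i : Int) + k) 0) n1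
      else nextCounterLoop nums (i + 1)
  else nums
termination_by 4 - i

def nextCounter (x : List Int) : List Int :=
  nextCounterLoop (x.foldl (fun nums i => nums ++ [i]) []) 0

-- ===== PORT B =====
-- Source B's _go: recursion over the reversed list with a budget of 4; none = saturated window
def goAlt : List Int → Nat → Option (List Int)
  | _, 0 => none
  | [], _ + 1 => none
  | d :: rest, b + 1 =>
    if d ≠ 3 then some ((d + 1) :: rest)
    else match goAlt rest b with
      | none => none
      | some r => some ((0 : Int) :: r)

def nextCounter_alt (x : List Int) : List Int :=
  match goAlt x.reverse 4 with
  | none => x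
  | some r => r.reverse

-- ===== PRECONDITION & SPEC =====
-- Pre_ excludes exactly the inputs where A raises IndexError: lists shorter than 4 whose
-- entries are all 3 (A's counter loop then runs off the left end of the list).
def Pre_nextCounter (x : List Int) : Prop := 4 ≤ x.length ∨ ∃ d ∈ x, d ≠ 3
instance (x : List Int) : Decidable (Pre_nextCounter x) := by unfold Pre_nextCounter; infer_instance
def pvWitness_nextCounter : List Int := [0, 1, 2, 3]

def Spec_nextCounter (x : List Int) (out : List Int) : Prop := out = nextCounter_alt x
instance (x : List Int) (out : List Int) : Decidable (Spec_nextCounter x out) := by unfold Spec_nextCounter; infer_instance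

-- ===== CLAIM (what is proved, stated in full; the proofs are below) =====
def Claim_equal_nextCounter : Prop := ∀ (x : List Int), Dom_nextCounter x → Pre_nextCounter x → Spec_nextCounter x (nextCounter x)

-- ===== LEMMAS AND PROOFS =====

theorem copy_foldl (x : List Int) : ∀ acc, x.foldl (fun nums i => nums ++ [i]) acc = acc ++ x := by
  induction x with
  | nil => simp
  | cons a t ih => intro acc; simp [List.foldl, ih]

-- number of leading 3s, used only to split the input into run + rest in the proof
def count3 : List Int → Nat
  | [] => 0
  | d :: t => if d ≠ 3 then 0 else count3 t + 1

theorem count3_le (l : List Int) : count3 l ≤ l.length := by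
  induction l with
  | nil => simp [count3]
  | cons a t ih => simp only [count3]; split <;> simp <;> omega

theorem count3_split (l : List Int) (k : Nat) (hk : k ≤ count3 l) :
    ∃ t, l = List.replicate k 3 ++ t := by
  induction k generalizing l with
  | zero => exact ⟨l, by simp⟩
  | succ n ih =>
    cases l with
    | nil => simp [count3] at hk
    | cons a t =>
      by_cases ha : a = 3
      · subst ha
        have : n ≤ count3 t := by simp [count3] at hk; omega
        obtain ⟨t', ht⟩ := ih t this
        exact ⟨t', by simp [List.replicate_succ, ht]⟩
      · simp [count3, ha] at hk

theorem count3_split_lt (l : List Int) (hl : count3 l < l.length) :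
    ∃ d t, l = List.replicate (count3 l) 3 ++ d :: t ∧ d ≠ 3 := by
  induction l with
  | nil => simp at hl
  | cons a t ih =>
    by_cases ha : a = 3
    · subst ha
      have hlt : count3 t < t.length := by simp [count3] at hl ⊢; omega
      obtain ⟨d, t', ht, hd⟩ := ih hlt
      exact ⟨d, t', by simp [count3, List.replicate_succ]; exact ht, hd⟩
    · exact ⟨a, t, by simp [count3, ha], ha⟩

theorem pySetD_neg (xs : List Int) (k : Nat) (v : Int) (h1 : 0 < k) (h2 : k ≤ xs.length) :
    PySem.List.pySetD xs (-(k : Int)) v = xs.set (xs.length - k) v := by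
  simp only [PySem.List.pySetD, PySem.List.pySet?, PySem.List.pyIdx?]
  have hge : -(xs.length : Int) ≤ -(k : Int) := by omega
  have hk0 : k ≠ 0 := by omega
  simp [hge, hk0]

theorem pyGet?_append_w (z w : List Int) (k : Nat) (h1 : 0 < k) (h2 : k ≤ w.length) :
    PySem.List.pyGet? (z ++ w) (-(k : Int)) = w[w.length - k]? := by
  rw [PySem.List.pyGet?_neg_natCast _ k h1 (by simp; omega)]
  rw [List.getElem?_append_right (by simp; omega)]
  congr 1
  simp; omega

theorem pySetD_append_w (z w : List Int) (k : Nat) (v : Int) (h1 : 0 < k) (h2 : k ≤ w.length) :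
    PySem.List.pySetD (z ++ w) (-(k : Int)) v = z ++ w.set (w.length - k) v := by
  have hL : (z ++ w).length = z.length + w.length := by simp
  rw [pySetD_neg _ k v h1 (by omega)]
  rw [List.set_append_right _ _ (by omega)]
  congr 2
  omega

-- one iteration of A's loop that sees a 3 and moves on
theorem loop_step3 (z w : List Int) (i : Nat) (hi : i < 4) (hw : i + 1 ≤ w.length)
    (h3 : w[w.length - (i + 1)]? = some 3) :
    nextCounterLoop (z ++ w) i = nextCounterLoop (z ++ w) (i + 1) := by
  rw [nextCounterLoop]
  have e : PySem.List.pyGet? (z ++ w) (-(i : Int) - 1) = some 3 := by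
    rw [show (-(i : Int) - 1) = -(((i + 1 : Nat)) : Int) by push_cast; ring]
    rw [pyGet?_append_w z w (i + 1) (by omega) hw]
    exact h3
  simp [e, hi]

-- the iteration of A's loop that sees a non-3 digit, increments it and enters the zeroing loop
theorem loop_stepd (z w : List Int) (i : Nat) (d : Int) (hi : i < 4) (hw : i + 1 ≤ w.length)
    (hget : w[w.length - (i + 1)]? = some d) (hd : d ≠ 3) :
    nextCounterLoop (z ++ w) i =
      (PySem.List.pyRange 0 (i : Int) 1).foldl
        (fun a k => PySem.List.pySetD a (-(i : Int) + k) 0)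
        (z ++ w.set (w.length - (i + 1)) (d + 1)) := by
  rw [nextCounterLoop]
  have e : PySem.List.pyGet? (z ++ w) (-(i : Int) - 1) = some d := by
    rw [show (-(i : Int) - 1) = -(((i + 1 : Nat)) : Int) by push_cast; ring]
    rw [pyGet?_append_w z w (i + 1) (by omega) hw]
    exact hget
  have es : PySem.List.pySetD (z ++ w) (-(i : Int) - 1) (d + 1)
      = z ++ w.set (w.length - (i + 1)) (d + 1) := by
    rw [show (-(i : Int) - 1) = -(((i + 1 : Nat)) : Int) by push_cast; ring]
    rw [pySetD_append_w z w (i + 1) (d + 1) (by omega) hw]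
  simp [e, es, hi, hd]

-- A's loop on a list whose last 4 entries are all 3 returns it unchanged
theorem loop_sat (y : List Int) : nextCounterLoop (y ++ [3, 3, 3, 3]) 0 = y ++ [3, 3, 3, 3] := by
  rw [loop_step3 y [3,3,3,3] 0 (by omega) (by simp) (by simp),
      loop_step3 y [3,3,3,3] 1 (by omega) (by simp) (by simp),
      loop_step3 y [3,3,3,3] 2 (by omega) (by simp) (by simp),
      loop_step3 y [3,3,3,3] 3 (by omega) (by simp) (by simp)]
  rw [nextCounterLoop]
  simp

-- A's loop when exactly k (< 4) trailing entries are 3 and the digit before them is d ≠ 3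
theorem loop_val (z : List Int) (d : Int) (k : Nat) (hd : d ≠ 3) (hk : k < 4) :
    nextCounterLoop (z ++ d :: List.replicate k 3) 0 = z ++ (d + 1) :: List.replicate k 0 := by
  interval_cases k
  · rw [show (List.replicate 0 (3 : Int)) = [] from rfl]
    rw [loop_stepd z [d] 0 d (by omega) (by simp) (by simp) hd]
    simp [PySem.List.pyRange]
  · rw [show (d :: List.replicate 1 (3 : Int)) = [d, 3] from rfl]
    rw [loop_step3 z [d,3] 0 (by omega) (by simp) (by simp),
        loop_stepd z [d,3] 1 d (by omega) (by simp) (by simp) hd]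
    rw [show PySem.List.pyRange 0 ((1:Nat) : Int) 1 = [0] from by decide]
    simp only [List.foldl]
    rw [show ([d,3].set ([d,3].length - (1+1)) (d+1)) = [d+1,3] from by simp]
    rw [show (-((1:Nat) : Int) + 0) = -((1:Nat) : Int) by norm_num]
    rw [pySetD_append_w z [d+1,3] 1 0 (by omega) (by simp)]
    simp [List.replicate]
  · rw [show (d :: List.replicate 2 (3 : Int)) = [d, 3, 3] from rfl]
    rw [loop_step3 z [d,3,3] 0 (by omega) (by simp) (by simp),
        loop_step3 z [d,3,3] 1 (by omega) (by simp) (by simp),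
        loop_stepd z [d,3,3] 2 d (by omega) (by simp) (by simp) hd]
    rw [show PySem.List.pyRange 0 ((2:Nat) : Int) 1 = [0, 1] from by decide]
    simp only [List.foldl]
    rw [show ([d,3,3].set ([d,3,3].length - (2+1)) (d+1)) = [d+1,3,3] from by simp]
    rw [show (-((2:Nat) : Int) + 0) = -((2:Nat) : Int) by norm_num]
    rw [pySetD_append_w z [d+1,3,3] 2 0 (by omega) (by simp)]
    rw [show ([d+1,3,3].set ([d+1,3,3].length - 2) 0) = [d+1,0,3] from by simp]
    rw [show (-((2:Nat) : Int) + 1) = -((1:Nat) : Int) by norm_num]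
    rw [pySetD_append_w z [d+1,0,3] 1 0 (by omega) (by simp)]
    simp [List.replicate]
  · rw [show (d :: List.replicate 3 (3 : Int)) = [d, 3, 3, 3] from rfl]
    rw [loop_step3 z [d,3,3,3] 0 (by omega) (by simp) (by simp),
        loop_step3 z [d,3,3,3] 1 (by omega) (by simp) (by simp),
        loop_step3 z [d,3,3,3] 2 (by omega) (by simp) (by simp),
        loop_stepd z [d,3,3,3] 3 d (by omega) (by simp) (by simp) hd]
    rw [show PySem.List.pyRange 0 ((3:Nat) : Int) 1 = [0, 1, 2] from by decide]
    simp only [List.foldl]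
    rw [show ([d,3,3,3].set ([d,3,3,3].length - (3+1)) (d+1)) = [d+1,3,3,3] from by simp]
    rw [show (-((3:Nat) : Int) + 0) = -((3:Nat) : Int) by norm_num]
    rw [pySetD_append_w z [d+1,3,3,3] 3 0 (by omega) (by simp)]
    rw [show ([d+1,3,3,3].set ([d+1,3,3,3].length - 3) 0) = [d+1,0,3,3] from by simp]
    rw [show (-((3:Nat) : Int) + 1) = -((2:Nat) : Int) by norm_num]
    rw [pySetD_append_w z [d+1,0,3,3] 2 0 (by omega) (by simp)]
    rw [show ([d+1,0,3,3].set ([d+1,0,3,3].length - 2) 0) = [d+1,0,0,3] from by simp]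
    rw [show (-((3:Nat) : Int) + 2) = -((1:Nat) : Int) by norm_num]
    rw [pySetD_append_w z [d+1,0,0,3] 1 0 (by omega) (by simp)]
    simp [List.replicate]

-- B's recursion on a run of k 3s followed by d ≠ 3, with budget b > k
theorem goAlt_val (k : Nat) (d : Int) (t : List Int) (hd : d ≠ 3) :
    ∀ b, k < b → goAlt (List.replicate k 3 ++ d :: t) b
      = some (List.replicate k 0 ++ (d + 1) :: t) := by
  induction k with
  | zero =>
    intro b hb
    cases b with
    | zero => omega
    | succ n => simp [goAlt, hd]
  | succ m ih =>
    intro b hb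
    cases b with
    | zero => omega
    | succ n =>
      have := ih n (by omega)
      simp [List.replicate_succ, goAlt, this]

-- B's recursion on four leading 3s: budget exhausted, saturated
theorem goAlt_sat (t : List Int) : goAlt ([3, 3, 3, 3] ++ t) 4 = none := by
  simp [goAlt]

theorem alt_val (z : List Int) (d : Int) (k : Nat) (hd : d ≠ 3) (hk : k < 4) :
    nextCounter_alt (z ++ d :: List.replicate k 3) = z ++ (d + 1) :: List.replicate k 0 := by
  unfold nextCounter_alt
  have hrev : (z ++ d :: List.replicate k 3).reverse
      = List.replicate k 3 ++ d :: z.reverse := by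
    simp [List.reverse_append, List.reverse_cons, List.reverse_replicate]
  rw [hrev, goAlt_val k d z.reverse hd 4 hk]
  simp [List.reverse_append, List.reverse_replicate]

theorem alt_sat (y : List Int) : nextCounter_alt (y ++ [3, 3, 3, 3]) = y ++ [3, 3, 3, 3] := by
  unfold nextCounter_alt
  have hrev : (y ++ [3, 3, 3, 3] : List Int).reverse = [3, 3, 3, 3] ++ y.reverse := by
    simp [List.reverse_append]
  rw [hrev, goAlt_sat]

-- ===== VERDICT (by name: the statement is the Claim_ definition above) =====
theorem nextCounter_spec : Claim_equal_nextCounter := by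
  unfold Claim_equal_nextCounter
  intro x _hdom hpre
  unfold Spec_nextCounter nextCounter
  rw [copy_foldl x [], List.nil_append]
  by_cases h4 : 4 ≤ count3 x.reverse
  · obtain ⟨t, ht⟩ := count3_split x.reverse 4 h4
    have hx : x = t.reverse ++ [3, 3, 3, 3] := by
      have := congrArg List.reverse ht
      simpa using this
    rw [hx, loop_sat, alt_sat]
  · push_neg at h4
    have hle : count3 x.reverse ≤ x.length := by
      have := count3_le x.reverse; simpa using this
    have hlt : count3 x.reverse < x.reverse.length := by
      simp only [List.length_reverse]
      rcases lt_or_eq_of_le hle with h | h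
      · exact h
      · exfalso
        obtain ⟨t, ht⟩ := count3_split x.reverse (count3 x.reverse) le_rfl
        have htlen : t.length = 0 := by
          have := congrArg List.length ht
          simp at this; omega
        have ht0 : t = [] := List.length_eq_zero_iff.mp htlen
        have ht' : x.reverse = List.replicate (count3 x.reverse) 3 := by
          conv_lhs => rw [ht, ht0, List.append_nil]
        have hxrep : x = List.replicate (count3 x.reverse) 3 := by
          conv_lhs => rw [← List.reverse_reverse x, ht']
          rw [List.reverse_replicate]
        rcases hpre with hp | ⟨d, hdmem, hdne⟩
        · omega
        · rw [hxrep] at hdmem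
          exact hdne (List.eq_of_mem_replicate hdmem)
    obtain ⟨d, t, ht, hd⟩ := count3_split_lt x.reverse hlt
    have hx : x = t.reverse ++ d :: List.replicate (count3 x.reverse) 3 := by
      have := congrArg List.reverse ht
      simpa [List.reverse_replicate] using this
    rw [hx, loop_val t.reverse d _ hd h4, alt_val t.reverse d _ hd h4]
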